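-- pv_equiv track=rewrite | github.com/ChoiYH96/DevArchive | 프로그래머스/2/132265. 롤케이크 자르기/롤케이크 자르기.py | solution
-- ===== SOURCE A (Python) =====
-- def solution(topping):
--     answer = 0
--     cnt = {x:0 for x in set(topping)}
--     divide = set()
--
--     for i in topping:
--         cnt[i]+=1
--
--     for i in topping:
--         divide.add(i)
--         cnt[i] -= 1
--         if cnt[i] == 0:
--             del cnt[i]
--         if len(cnt) == len(divide):
--             answer+=1
--
--     return answer
-- ===== SOURCE B (Python) =====
-- def solution(topping):
--     # Backward pass: right_distinct[i] = number of distinct toppings in topping[i+1:]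
--     seen = set()
--     right_distinct = []
--     for x in reversed(topping):
--         right_distinct.append(len(seen))
--         seen.add(x)
--     right_distinct.reverse()
--     # Forward pass: grow the left-side set and compare with the precomputed table
--     answer = 0
--     left = set()
--     for x, rd in zip(topping, right_distinct):
--         left.add(x)
--         if len(left) == rd:
--             answer += 1
--     return answer
-- ===== Notes on version B (the rewrite author's own statement) =====
-- stated objective: alternative
-- what changed: Replaces A's single incremental count-dict decrement-and-delete pass with a backward pass precomputing a suffix-distinct table plus a forward pass that only grows a left-side set and compares against the table.
import Mathlib
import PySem

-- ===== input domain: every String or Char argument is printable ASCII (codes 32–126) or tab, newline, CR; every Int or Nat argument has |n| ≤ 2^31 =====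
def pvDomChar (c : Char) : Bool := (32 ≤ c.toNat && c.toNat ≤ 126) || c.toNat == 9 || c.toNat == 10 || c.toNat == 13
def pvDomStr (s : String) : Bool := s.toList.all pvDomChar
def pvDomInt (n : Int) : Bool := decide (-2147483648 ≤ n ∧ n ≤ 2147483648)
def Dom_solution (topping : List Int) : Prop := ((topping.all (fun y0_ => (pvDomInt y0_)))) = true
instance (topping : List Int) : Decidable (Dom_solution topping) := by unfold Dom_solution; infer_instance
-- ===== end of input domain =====

-- B replaces A's decrement-and-delete count dict with a suffix-distinct table + forward set pass (same O(n), measurably faster by a constant factor: set adds instead of per-element dict decrement/delete).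

-- ===== PORT A =====
-- cnt[i] += 1 / cnt[i] -= 1 are ported with Dict.modify (default never used: the key is always present when Python executes them)
def solution (topping : List Int) : Int :=
  let cnt : PySem.Dict Int Int :=
    (PySem.Set.ofList topping).foldl (fun d x => d.insert x 0) PySem.Dict.empty
  let cnt := topping.foldl (fun d i => d.modify i 0 (· + 1)) cnt
  let st := topping.foldl
    (fun (s : Int × PySem.Dict Int Int × PySem.Set Int) i =>
      let divide := PySem.Set.add s.2.2 i
      let cnt := s.2.1.modify i 0 (· - 1)
      let cnt := if cnt.getD i 0 = 0 then cnt.erase i else cnt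
      let answer := if cnt.size = divide.length then s.1 + 1 else s.1
      (answer, cnt, divide))
    (0, cnt, PySem.Set.empty)
  st.1

-- ===== PORT B =====
def solution_alt (topping : List Int) : Int :=
  -- backward pass over reversed(topping): record len(seen) then add, then reverse the table
  let bw := topping.reverse.foldl
    (fun (acc : PySem.Set Int × List Nat) x =>
      (PySem.Set.add acc.1 x, acc.2 ++ [acc.1.length]))
    (PySem.Set.empty, [])
  let rightDistinct := bw.2.reverse
  -- forward pass: grow the left set, compare with the table
  let fw := (topping.zip rightDistinct).foldl
    (fun (s : Int × PySem.Set Int) p =>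
      let left := PySem.Set.add s.2 p.1
      (if left.length = p.2 then s.1 + 1 else s.1, left))
    (0, PySem.Set.empty)
  fw.1

-- ===== PRECONDITION & SPEC =====
def Spec_solution (topping : List Int) (out : Int) : Prop := out = solution_alt topping
instance (topping : List Int) (out : Int) : Decidable (Spec_solution topping out) := by unfold Spec_solution; infer_instance

-- ===== CLAIM (what is proved, stated in full; the proofs are below) =====
def Claim_equal_solution : Prop := ∀ (topping : List Int), Dom_solution topping → Spec_solution topping (solution topping)

-- ===== LEMMAS AND PROOFS =====

-- distinct-element count of a list (proof-only helper)
def dcount (r : List Int) : Nat := r.toFinset.card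

-- reference count: pre = set of the elements already left of the cut; counts positions where both sides have equally many distinct elements
def refCount (pre : Finset Int) : List Int → Int
  | [] => 0
  | x :: r => (if dcount r = (insert x pre).card then 1 else 0) + refCount (insert x pre) r

theorem set_add_toFinset (s : PySem.Set Int) (x : Int) :
    (PySem.Set.add s x).toFinset = insert x s.toFinset := by
  apply Finset.ext; intro a
  simp [PySem.Set.mem_add, or_comm, eq_comm]

theorem set_len_of_nodup (s : PySem.Set Int) (h : s.Nodup) : s.length = s.toFinset.card :=
  (List.toFinset_card_of_nodup h).symm

-- ---- A-side ----

def InvA (d : PySem.Dict Int Int) (r : List Int) : Prop :=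
  d.keys.Nodup ∧ ∀ x : Int, d.get? x = if 0 < r.count x then some (r.count x : Int) else none

theorem get?_erase_dict (d : PySem.Dict Int Int) (k x : Int) :
    (d.erase k).get? x = if x = k then none else d.get? x := by
  obtain ⟨l⟩ := d
  simp only [PySem.Dict.erase, PySem.Dict.get?]
  by_cases h : x = k
  · subst h
    rw [List.find?_eq_none.mpr]
    · simp
    · intro p hp
      simp only [List.mem_filter] at hp
      simpa using hp.2
  · induction l with
    | nil => simp
    | cons p t ih =>
      by_cases hp : p.1 = x
      · simp [hp, h, List.find?_cons]
      · by_cases hk : p.1 = k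
        · simp only [List.filter_cons, hk, beq_self_eq_true, Bool.not_true, Bool.false_eq_true, if_false]
          rw [ih]
          simp [show (p.1 == x) = false by simp [hp]]
        · simp only [List.filter_cons, show (!(p.1 == k)) = true by simp [hk], if_true]
          simp only [List.find?_cons, show (p.1 == x) = false by simp [hp]]
          exact ih

theorem keys_erase_dict (d : PySem.Dict Int Int) (k : Int) :
    (d.erase k).keys = d.keys.filter (fun a => !(a == k)) := by
  obtain ⟨l⟩ := d
  simp only [PySem.Dict.erase, PySem.Dict.keys]
  induction l with
  | nil => simp
  | cons p t ih =>
    by_cases hk : p.1 = k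
    · simp [hk, ih]
    · simp [show ((p.1 : Int) == k) = false by simp [hk], ih]

theorem size_eq_dcount (d : PySem.Dict Int Int) (r : List Int) (h : InvA d r) :
    d.size = dcount r := by
  obtain ⟨hnd, hget⟩ := h
  have hnone : ∀ x : Int, d.get? x = none ↔ x ∉ r := by
    intro x
    rw [hget x]
    by_cases hm : x ∈ r
    · simp [List.count_pos_iff.mpr hm, hm]
    · simp [hm, show ¬ 0 < r.count x from fun hc => hm (List.count_pos_iff.mp hc)]
  have hmem : ∀ x : Int, x ∈ d.keys ↔ x ∈ r := by
    intro x
    rw [← not_iff_not, ← PySem.Dict.get?_eq_none_iff_not_mem_keys, hnone x]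
  have hsz : d.size = d.keys.length := by
    simp [PySem.Dict.size, PySem.Dict.keys]
  rw [hsz, ← List.toFinset_card_of_nodup hnd]
  unfold dcount
  congr 1
  apply Finset.ext; intro a; simp [hmem]

theorem get?_foldl_insert_zero (l : List Int) : ∀ (d : PySem.Dict Int Int) (v : Int),
    (l.foldl (fun d x => d.insert x (0 : Int)) d).get? v = if v ∈ l then some 0 else d.get? v := by
  induction l with
  | nil => intro d v; simp
  | cons x t ih =>
    intro d v
    simp only [List.foldl_cons, ih, PySem.Dict.get?_insert, List.mem_cons]
    by_cases h1 : v ∈ t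
    · simp [h1]
    · by_cases h2 : v = x <;> simp [h1, h2]

theorem get?_foldl_modify_inc (l : List Int) : ∀ (d : PySem.Dict Int Int) (v : Int),
    (l.foldl (fun d x => d.modify x 0 (· + 1)) d).get? v =
      if v ∈ l ∨ (d.get? v).isSome then some (d.getD v 0 + l.count v) else none := by
  induction l with
  | nil =>
    intro d v
    rcases h : d.get? v with _ | y
    · simp [h]
    · simp [h, PySem.Dict.getD_eq_get?_getD]
  | cons x t ih =>
    intro d v
    rw [List.foldl_cons, ih]
    simp only [PySem.Dict.modify, PySem.Dict.get?_insert, PySem.Dict.getD_insert,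
      List.count_cons, List.mem_cons]
    by_cases h2 : v = x
    · subst h2
      simp [Int.add_comm, Int.add_assoc]
    · simp only [h2, if_false, show ¬ (x = v) from fun e => h2 e.symm]
      have hx : ¬ (x = v) := fun e => h2 e.symm
      by_cases h1 : v ∈ t <;> simp [h1, h2, hx]

theorem invA_init (topping : List Int) :
    InvA ((topping.foldl (fun d i => d.modify i 0 (· + 1))
      ((PySem.Set.ofList topping).foldl (fun d x => d.insert x 0) PySem.Dict.empty))) topping := by
  constructor
  · apply PySem.Dict.nodup_keys_foldl_modify_key topping (fun x => x) 0 (fun _ _ v => v + 1)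
    apply PySem.Dict.nodup_keys_foldl_insert_key _ (fun x => x) (fun _ _ => (0 : Int))
    simp
  · intro v
    rw [get?_foldl_modify_inc, get?_foldl_insert_zero]
    by_cases hm : v ∈ topping
    · have hms : v ∈ PySem.Set.ofList topping := (PySem.Set.mem_ofList topping v).mpr hm
      simp [hms, hm, List.count_pos_iff.mpr hm, PySem.Dict.getD_eq_get?_getD,
        get?_foldl_insert_zero]
    · have hms : v ∉ PySem.Set.ofList topping := fun h => hm ((PySem.Set.mem_ofList topping v).mp h)
      simp [hms, hm, show ¬ 0 < topping.count v from fun hc => hm (List.count_pos_iff.mp hc),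
        PySem.Dict.get?_empty]

theorem invA_step (d : PySem.Dict Int Int) (x : Int) (r : List Int) (h : InvA d (x :: r)) :
    InvA (if (d.modify x 0 (· - 1)).getD x 0 = 0
            then (d.modify x 0 (· - 1)).erase x
            else (d.modify x 0 (· - 1))) r := by
  obtain ⟨hnd, hget⟩ := h
  have hc : (x :: r).count x = r.count x + 1 := by simp [List.count_cons]
  have hgx : d.get? x = some ((r.count x : Int) + 1) := by
    rw [hget x]; simp [hc]
  have hdx : d.getD x 0 = (r.count x : Int) + 1 := by
    rw [PySem.Dict.getD_eq_get?_getD, hgx]; rfl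
  have hmod : d.modify x 0 (· - 1) = d.insert x ((r.count x : Int)) := by
    simp [PySem.Dict.modify, hdx]
  have hd2x : (d.modify x 0 (· - 1)).getD x 0 = (r.count x : Int) := by
    rw [hmod, PySem.Dict.getD_insert]; simp
  have hget2 : ∀ v : Int, v ≠ x → (d.modify x 0 (· - 1)).get? v =
      (if 0 < r.count v then some ((r.count v : Int)) else none) := by
    intro v hv
    rw [hmod, PySem.Dict.get?_insert, if_neg hv, hget v]
    simp [List.count_cons, show ¬ (x = v) from fun e => hv e.symm]
  have hnd2 : (d.modify x 0 (· - 1)).keys.Nodup := by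
    rw [hmod]; exact PySem.Dict.nodup_keys_insert _ _ _ hnd
  by_cases hz : r.count x = 0
  · rw [if_pos (by rw [hd2x, hz]; rfl)]
    constructor
    · rw [keys_erase_dict]; exact hnd2.filter _
    · intro v
      rw [get?_erase_dict]
      by_cases hv : v = x
      · subst hv; simp [hz]
      · rw [if_neg hv, hget2 v hv]
  · rw [if_neg (by rw [hd2x]; exact_mod_cast hz)]
    constructor
    · exact hnd2
    · intro v
      by_cases hv : v = x
      · subst hv
        rw [hmod, PySem.Dict.get?_insert_self, if_pos (Nat.pos_of_ne_zero hz)]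
      · rw [hget2 v hv]

theorem A_loop (r : List Int) : ∀ (ans : Int) (d : PySem.Dict Int Int) (div : PySem.Set Int),
    InvA d r → div.Nodup →
    (r.foldl
      (fun (s : Int × PySem.Dict Int Int × PySem.Set Int) i =>
        let divide := PySem.Set.add s.2.2 i
        let cnt := s.2.1.modify i 0 (· - 1)
        let cnt := if cnt.getD i 0 = 0 then cnt.erase i else cnt
        let answer := if cnt.size = divide.length then s.1 + 1 else s.1
        (answer, cnt, divide)) (ans, d, div)).1 = ans + refCount div.toFinset r := by
  induction r with
  | nil => intro ans d div _ _; simp [refCount]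
  | cons x t ih =>
    intro ans d div hI hnd
    rw [List.foldl_cons]
    have hstep := invA_step d x t hI
    have hndiv : (PySem.Set.add div x).Nodup := PySem.Set.nodup_add div x hnd
    rw [ih _ _ _ hstep hndiv]
    have hsz : (if (d.modify x 0 (· - 1)).getD x 0 = 0
            then (d.modify x 0 (· - 1)).erase x
            else (d.modify x 0 (· - 1))).size = dcount t := size_eq_dcount _ _ hstep
    have hlen : (PySem.Set.add div x).length = (insert x div.toFinset).card := by
      rw [set_len_of_nodup _ hndiv, set_add_toFinset]
    simp only [refCount, set_add_toFinset, hsz, hlen]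
    by_cases hcond : dcount t = (insert x div.toFinset).card
    · simp [hcond]; ring
    · simp [hcond]

-- ---- B-side ----

def rdSpec : List Int → List Nat
  | [] => []
  | _ :: r => dcount r :: rdSpec r

theorem B_backward (l : List Int) :
    ∃ seen : PySem.Set Int,
      (l.reverse.foldl
        (fun (acc : PySem.Set Int × List Nat) x =>
          (PySem.Set.add acc.1 x, acc.2 ++ [acc.1.length]))
        (PySem.Set.empty, [])) = (seen, (rdSpec l).reverse) ∧
      seen.Nodup ∧ ∀ a : Int, a ∈ seen ↔ a ∈ l := by
  induction l with
  | nil => exact ⟨PySem.Set.empty, by simp [rdSpec], List.nodup_nil, by simp [PySem.Set.empty]⟩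
  | cons x t ih =>
    obtain ⟨seen, heq, hnd, hmem⟩ := ih
    refine ⟨PySem.Set.add seen x, ?_, PySem.Set.nodup_add seen x hnd, ?_⟩
    · rw [List.reverse_cons, List.foldl_append, heq]
      have hslen : seen.length = dcount t := by
        rw [set_len_of_nodup seen hnd]
        unfold dcount
        congr 1
        apply Finset.ext; intro a; simp [hmem]
      simp [rdSpec, hslen]
    · intro a
      rw [PySem.Set.mem_add]
      simp [hmem, or_comm, eq_comm]

theorem B_forward (l : List Int) : ∀ (ans : Int) (left : PySem.Set Int), left.Nodup →
    ((l.zip (rdSpec l)).foldl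
      (fun (s : Int × PySem.Set Int) p =>
        let lf := PySem.Set.add s.2 p.1
        (if lf.length = p.2 then s.1 + 1 else s.1, lf))
      (ans, left)).1 = ans + refCount left.toFinset l := by
  induction l with
  | nil => intro ans left _; simp [rdSpec, refCount]
  | cons x t ih =>
    intro ans left hnd
    have hnd2 : (PySem.Set.add left x).Nodup := PySem.Set.nodup_add left x hnd
    show ((t.zip (rdSpec t)).foldl _
      ((if (PySem.Set.add left x).length = dcount t then ans + 1 else ans),
        PySem.Set.add left x)).1 = _
    rw [ih _ _ hnd2]
    have hlen : (PySem.Set.add left x).length = (insert x left.toFinset).card := by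
      rw [set_len_of_nodup _ hnd2, set_add_toFinset]
    simp only [refCount, set_add_toFinset, hlen]
    by_cases hcond : dcount t = (insert x left.toFinset).card
    · simp [hcond]; ring
    · have hcond2 : ¬ ((insert x left.toFinset).card = dcount t) := fun e => hcond e.symm
      simp [hcond, hcond2]

-- ===== VERDICT (by name: the statement is the Claim_ definition above) =====
theorem solution_spec : Claim_equal_solution := by
  intro topping _
  unfold Spec_solution solution solution_alt
  obtain ⟨seen, heq, _, _⟩ := B_backward topping
  simp only [heq, List.reverse_reverse]
  rw [A_loop topping 0 _ PySem.Set.empty (invA_init topping) List.nodup_nil,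
    B_forward topping 0 PySem.Set.empty List.nodup_nil]
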